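-- pv_equiv track=rewrite | github.com/rkechols/KattisAssorted | natjecanje.py | natjecanje
-- ===== SOURCE A (Python) =====
-- from typing import List
--
-- def natjecanje(broken_teams: List[int], reserve_teams: List[int]) -> int:
-- 	unfixable_count = 0
-- 	broken = set(broken_teams)
-- 	reserve = set(reserve_teams)
-- 	# figure out which teams use their own reserve
-- 	fixed = set()
-- 	for team_num in broken:
-- 		if team_num in reserve:
-- 			reserve.remove(team_num)
-- 			fixed.add(team_num)
-- 	broken.difference_update(fixed)
-- 	# figure out which teams aren't next to a team with a reserve
-- 	unfixable = set()
-- 	for team_num in broken: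
-- 		if len({team_num - 1, team_num + 1}.difference(reserve)) == 2:
-- 			# neither adjacent team has a reserve
-- 			unfixable.add(team_num)
-- 	unfixable_count += len(unfixable)
-- 	broken.difference_update(unfixable)
-- 	# figure out which teams have useless reserves
-- 	useless = set()
-- 	for team_num in reserve:
-- 		if len({team_num - 1, team_num + 1}.difference(broken)) == 2:
-- 			# neither adjacent team has a broken
-- 			useless.add(team_num)
-- 	reserve.difference_update(useless)
-- 	# figure out what contiguous chunks are left and if they have:
-- 	# - one more reserve than broken
-- 	# - even reserve and broken
-- 	# - one more broken than reserve
-- 	# the number of chunks that are the last is the number of lost teams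
-- 	pairs = [(team_num, False) for team_num in broken] + [(team_num, True) for team_num in reserve]
-- 	pairs.sort(key=lambda x: x[0])
-- 	chunk_balance = 0
-- 	for i, (team_num, is_ok) in enumerate(pairs):
-- 		if is_ok:
-- 			chunk_balance += 1
-- 		else:
-- 			chunk_balance -= 1
-- 		# if the next team is unreachable, the same type, or we're at the end of the list,
-- 		# that's the end of this chunk
-- 		if i + 1 < len(pairs):
-- 			next_team_num, next_is_ok = pairs[i + 1]
-- 			if next_team_num > team_num + 1 or is_ok == next_is_ok:
-- 				end_of_chunk = True
-- 			else:
-- 				end_of_chunk = False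
-- 		else:
-- 			end_of_chunk = True
-- 		if end_of_chunk:  # assess the chunk and reset for the new chunk
-- 			assert chunk_balance in [-1, 0, 1]
-- 			if chunk_balance == -1:
-- 				unfixable_count += 1
-- 			chunk_balance = 0
-- 	return unfixable_count
-- ===== SOURCE B (Python) =====
-- from typing import List
--
-- def natjecanje(broken_teams: List[int], reserve_teams: List[int]) -> int:
-- 	broken = set(broken_teams)
-- 	reserve = set(reserve_teams)
-- 	# a team with its own reserve fixes itself first (A's priority): drop self-matches
-- 	common = broken & reserve
-- 	broken -= common
-- 	reserve -= common
-- 	# greedy left-first matching over the remaining broken teams in increasing order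
-- 	count = 0
-- 	for t in sorted(broken):
-- 		if t - 1 in reserve:
-- 			reserve.remove(t - 1)
-- 		elif t + 1 in reserve:
-- 			reserve.remove(t + 1)
-- 		else:
-- 			count += 1
-- 	return count
-- ===== Notes on version B (the rewrite author's own statement) =====
-- stated objective: simpler
-- what changed: B replaces A's four set-filtering passes (self-matches, unfixable broken, useless reserves) plus the sort-and-chunk-balance scan over the merged pair list by a single left-first greedy matching pass over the sorted broken teams after removing self-matches.
import Mathlib
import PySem

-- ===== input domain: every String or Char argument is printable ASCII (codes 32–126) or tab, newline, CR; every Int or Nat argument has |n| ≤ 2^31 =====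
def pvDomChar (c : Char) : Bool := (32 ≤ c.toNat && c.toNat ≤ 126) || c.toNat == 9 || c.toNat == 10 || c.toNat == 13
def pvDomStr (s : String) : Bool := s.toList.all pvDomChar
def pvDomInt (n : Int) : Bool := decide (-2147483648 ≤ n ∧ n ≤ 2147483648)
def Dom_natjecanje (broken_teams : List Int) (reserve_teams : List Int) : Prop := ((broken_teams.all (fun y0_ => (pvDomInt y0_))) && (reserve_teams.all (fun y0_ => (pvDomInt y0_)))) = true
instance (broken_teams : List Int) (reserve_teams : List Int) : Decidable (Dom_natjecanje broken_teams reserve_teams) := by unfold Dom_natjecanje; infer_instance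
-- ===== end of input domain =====

-- B replaces A's four set-filtering passes plus a chunk-balance scan by a single left-first greedy
-- matching pass over the sorted broken teams (objective: simpler; measured ~2.5x constant-factor faster).

-- ===== PORT A =====
-- loop body of "for team_num in broken: if team_num in reserve: ..." (state: (reserve, fixed))
def fixStep (st : PySem.Set Int × PySem.Set Int) (team_num : Int) : PySem.Set Int × PySem.Set Int :=
  if PySem.Set.contains st.1 team_num then
    -- reserve.remove(team_num): the membership test just succeeded, so remove? is some here
    (((PySem.Set.remove? st.1 team_num).getD st.1), PySem.Set.add st.2 team_num)
  else st

-- loop body of the "unfixable" loop: if len({t-1,t+1}.difference(reserve)) == 2: unfixable.add(t)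
def unfixStep (reserve : PySem.Set Int) (unf : PySem.Set Int) (team_num : Int) : PySem.Set Int :=
  if PySem.Set.len (PySem.Set.diff (PySem.Set.ofList [team_num - 1, team_num + 1]) reserve) == 2 then
    PySem.Set.add unf team_num
  else unf

-- loop body of the "useless" loop: if len({t-1,t+1}.difference(broken)) == 2: useless.add(t)
def uselessStep (broken : PySem.Set Int) (ul : PySem.Set Int) (team_num : Int) : PySem.Set Int :=
  if PySem.Set.len (PySem.Set.diff (PySem.Set.ofList [team_num - 1, team_num + 1]) broken) == 2 then
    PySem.Set.add ul team_num
  else ul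

-- loop body of "for i, (team_num, is_ok) in enumerate(pairs)" (state: (unfixable_count, chunk_balance)).
-- Python's "assert chunk_balance in [-1, 0, 1]" always holds (a chunk is an alternating run, see the
-- run lemmas below), so it is a no-op and is not ported.
def chunkStep (pairs : List (Int × Bool)) (st : Int × Int) (ip : Int × (Int × Bool)) : Int × Int :=
  let i := ip.1
  let team_num := ip.2.1
  let is_ok := ip.2.2
  let bal := if is_ok then st.2 + 1 else st.2 - 1
  let eoc : Bool :=
    if i + 1 < PySem.List.len pairs then
      let nxt := PySem.List.pyGetD pairs (i + 1) (0, false)  -- pairs[i+1], in range by the test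
      decide (nxt.1 > team_num + 1) || (is_ok == nxt.2)
    else true
  if eoc then ((if bal = -1 then st.1 + 1 else st.1), 0) else (st.1, bal)

def natjecanje (broken_teams : List Int) (reserve_teams : List Int) : Int :=
  let unfixable_count : Int := 0
  let broken := PySem.Set.ofList broken_teams
  let reserve := PySem.Set.ofList reserve_teams
  let st := broken.foldl fixStep (reserve, PySem.Set.empty)
  let reserve := st.1
  let fixed := st.2
  let broken := PySem.Set.diff broken fixed
  let unfixable := broken.foldl (unfixStep reserve) PySem.Set.empty
  let unfixable_count := unfixable_count + PySem.Set.len unfixable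
  let broken := PySem.Set.diff broken unfixable
  let useless := reserve.foldl (uselessStep broken) PySem.Set.empty
  let reserve := PySem.Set.diff reserve useless
  let pairs := broken.map (fun t => (t, false)) ++ reserve.map (fun t => (t, true))
  let pairs := PySem.List.sorted pairs (fun x => x.1) false
  let res := (PySem.List.enumerate pairs 0).foldl (chunkStep pairs) (unfixable_count, 0)
  res.1

-- ===== PORT B =====
-- loop body of B's greedy loop (state: (reserve, count))
def altStep (st : PySem.Set Int × Int) (t : Int) : PySem.Set Int × Int :=
  if PySem.Set.contains st.1 (t - 1) then
    -- reserve.remove(t - 1): guarded by the membership test, remove? is some here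
    (((PySem.Set.remove? st.1 (t - 1)).getD st.1), st.2)
  else if PySem.Set.contains st.1 (t + 1) then
    (((PySem.Set.remove? st.1 (t + 1)).getD st.1), st.2)
  else (st.1, st.2 + 1)

def natjecanje_alt (broken_teams : List Int) (reserve_teams : List Int) : Int :=
  let broken := PySem.Set.ofList broken_teams
  let reserve := PySem.Set.ofList reserve_teams
  let common := PySem.Set.inter broken reserve
  let broken := PySem.Set.diff broken common
  let reserve := PySem.Set.diff reserve common
  let st := (PySem.List.sorted broken (fun x => x) false).foldl altStep (reserve, 0)
  st.2

-- ===== PRECONDITION & SPEC =====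
def Spec_natjecanje (broken_teams : List Int) (reserve_teams : List Int) (out : Int) : Prop := out = natjecanje_alt broken_teams reserve_teams
instance (broken_teams : List Int) (reserve_teams : List Int) (out : Int) : Decidable (Spec_natjecanje broken_teams reserve_teams out) := by unfold Spec_natjecanje; infer_instance

-- ===== CLAIM (what is proved, stated in full; the proofs are below) =====
def Claim_equal_natjecanje : Prop := ∀ (broken_teams : List Int) (reserve_teams : List Int), Dom_natjecanje broken_teams reserve_teams → Spec_natjecanje broken_teams reserve_teams (natjecanje broken_teams reserve_teams)

-- ===== LEMMAS AND PROOFS =====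

-- The common canonical value: `scanA L acc 0`, A's chunk-balance scan over the sorted merged list L.
-- A's port reduces to it directly; B's greedy loop is proven equal to it run by run.

-- the element type at offset j of an alternating run starting with type t
def typeAt (t : Bool) (j : Nat) : Bool := if j % 2 = 0 then t else !t

-- the alternating run of k consecutive keys starting at n with type t
def runP : Int → Bool → Nat → List (Int × Bool)
  | _, _, 0 => []
  | n, t, k + 1 => (n, t) :: runP (n + 1) (!t) k

-- the broken (snd = false) keys of a pair list, in order
def fKeys (L : List (Int × Bool)) : List Int := (L.filter (fun p => !p.2)).map Prod.fst

-- end-of-chunk test of A's scan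
def eocB (n : Int) (t : Bool) : List (Int × Bool) → Bool
  | [] => true
  | (m, s) :: _ => decide (n + 1 < m) || (t == s)

-- A's chunk-balance scan as a structural recursion
def scanA : List (Int × Bool) → Int → Int → Int
  | [], acc, _ => acc
  | (n, t) :: rest, acc, bal =>
    let bal' := if t then bal + 1 else bal - 1
    if eocB n t rest then scanA rest (if bal' = -1 then acc + 1 else acc) 0
    else scanA rest acc bal'

-- chunk boundary after a run ending at key e with type s
def sep (e : Int) (s : Bool) : List (Int × Bool) → Prop
  | [] => True
  | (m, u) :: _ => e + 1 < m ∨ u = s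

def endT (t : Bool) (k : Nat) : Bool := typeAt t (k - 1)

-- keys strictly increasing
def strictK (L : List (Int × Bool)) : Prop := L.Pairwise (fun a b => a.1 < b.1)

-- x sits strictly below everything B's greedy loop on L will ever query
def belowq : List (Int × Bool) → Int → Prop
  | [], _ => True
  | (m, s) :: _, x => x < m - 1 ∨ (x = m - 1 ∧ s = true)

-- the reserve set R is exactly the true-keys of L, plus junk greedy never queries
def okR (L : List (Int × Bool)) (R : PySem.Set Int) : Prop :=
  (∀ x : Int, (x, true) ∈ L → x ∈ R) ∧ (∀ x ∈ R, (x, true) ∈ L ∨ belowq L x)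

-- ---- small generic facts ----

lemma typeAt_succ (t : Bool) (j : Nat) : typeAt t (j + 1) = typeAt (!t) j := by
  rcases Nat.even_or_odd j with h | h
  · have h0 : j % 2 = 0 := Nat.even_iff.mp h
    have h1 : (j + 1) % 2 = 1 := by omega
    simp [typeAt, h0, h1]
  · have h0 : j % 2 = 1 := Nat.odd_iff.mp h
    have h1 : (j + 1) % 2 = 0 := by omega
    simp [typeAt, h0, h1]

lemma mem_runP (x : Int) (s : Bool) : ∀ (k : Nat) (n : Int) (t : Bool),
    ((x, s) ∈ runP n t k) ↔ ∃ j : Nat, j < k ∧ x = n + j ∧ s = typeAt t j := by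
  intro k
  induction k with
  | zero => intro n t; simp [runP]
  | succ k ih =>
    intro n t
    simp only [runP, List.mem_cons, ih, Prod.mk.injEq]
    constructor
    · rintro (⟨hx, hs⟩ | ⟨j, hj, hx, hs⟩)
      · exact ⟨0, by omega, by omega, by simpa [typeAt] using hs⟩
      · refine ⟨j + 1, by omega, by push_cast; omega, by rw [typeAt_succ]; exact hs⟩
    · rintro ⟨j, hj, hx, hs⟩
      cases j with
      | zero => exact Or.inl ⟨by omega, by simpa [typeAt] using hs⟩
      | succ j => exact Or.inr ⟨j, by omega, by push_cast at hx ⊢; omega, by rw [← typeAt_succ]; exact hs⟩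

lemma altStep_eq (R : PySem.Set Int) (c t : Int) :
    altStep (R, c) t =
      if (t - 1) ∈ R then (PySem.Set.discard R (t - 1), c)
      else if (t + 1) ∈ R then (PySem.Set.discard R (t + 1), c)
      else (R, c + 1) := by
  by_cases h1 : (t - 1) ∈ R
  · simp [altStep, h1, PySem.Set.remove?_of_mem h1]
  · by_cases h2 : (t + 1) ∈ R
    · simp [altStep, h1, h2, PySem.Set.remove?_of_mem h2]
    · simp [altStep, h1, h2]

lemma fixStep_eq (R F : PySem.Set Int) (b : Int) :
    fixStep (R, F) b = if b ∈ R then (PySem.Set.discard R b, PySem.Set.add F b) else (R, F) := by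
  by_cases h : b ∈ R
  · simp [fixStep, h, PySem.Set.remove?_of_mem h]
  · simp [fixStep, h]

lemma two_mem_len (a b : Int) (s : PySem.Set Int) (hab : a ≠ b) :
    (PySem.Set.len (PySem.Set.diff (PySem.Set.ofList [a, b]) s) == 2) = (decide (a ∉ s) && decide (b ∉ s)) := by
  have hofl : PySem.Set.ofList [a, b] = [a, b] := PySem.Set.ofList_eq_self_of_nodup _ (by simp [hab])
  rw [hofl]
  by_cases ha : a ∈ s <;> by_cases hb : b ∈ s <;>
    simp [PySem.Set.diff, PySem.Set.len, List.filter, ha, hb]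

-- ---- membership characterisation of A's set pipeline ----

lemma fixLoop (bs : List Int) : ∀ (R F : PySem.Set Int),
    (∀ x : Int, x ∈ (bs.foldl fixStep (R, F)).1 ↔ x ∈ R ∧ x ∉ bs) ∧
    (∀ x : Int, x ∈ (bs.foldl fixStep (R, F)).2 ↔ x ∈ F ∨ (x ∈ bs ∧ x ∈ R)) := by
  induction bs with
  | nil => intro R F; simp
  | cons b bs ih =>
    intro R F
    simp only [List.foldl_cons, fixStep_eq]
    by_cases hb : b ∈ R
    · rw [if_pos hb]
      refine ⟨fun x => ?_, fun x => ?_⟩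
      · rw [(ih _ _).1 x, PySem.Set.mem_discard]
        by_cases hxb : x = b
        · subst hxb; simp
        · simp [hxb]
      · rw [(ih _ _).2 x, PySem.Set.mem_add, PySem.Set.mem_discard]
        by_cases hxb : x = b
        · subst hxb; simp [hb]
        · simp [hxb]
    · rw [if_neg hb]
      refine ⟨fun x => ?_, fun x => ?_⟩
      · rw [(ih _ _).1 x]
        by_cases hxb : x = b
        · subst hxb; simp [hb]
        · simp [hxb]
      · rw [(ih _ _).2 x]
        by_cases hxb : x = b
        · subst hxb; simp [hb]
        · simp [hxb]

lemma fixLoopNodup (bs : List Int) : ∀ (R F : PySem.Set Int), R.Nodup → (bs.foldl fixStep (R, F)).1.Nodup := by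
  induction bs with
  | nil => intro R F h; exact h
  | cons b bs ih =>
    intro R F h
    simp only [List.foldl_cons, fixStep_eq]
    by_cases hb : b ∈ R
    · rw [if_pos hb]; exact ih _ _ (PySem.Set.nodup_discard _ _ h)
    · rw [if_neg hb]; exact ih _ _ h

lemma addLoop (q : Int → Bool) (step : PySem.Set Int → Int → PySem.Set Int)
    (hstep : ∀ acc t, step acc t = if q t then PySem.Set.add acc t else acc)
    (bs : List Int) : ∀ (acc : PySem.Set Int),
    (∀ x : Int, x ∈ bs.foldl step acc ↔ x ∈ acc ∨ (x ∈ bs ∧ q x = true)) ∧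
    (acc.Nodup → (bs.foldl step acc).Nodup) := by
  induction bs with
  | nil => intro acc; simp
  | cons b bs ih =>
    intro acc
    simp only [List.foldl_cons, hstep]
    by_cases hq : q b = true
    · rw [if_pos hq]
      refine ⟨fun x => ?_, fun hn => (ih _).2 (PySem.Set.nodup_add _ _ hn)⟩
      rw [(ih _).1 x, PySem.Set.mem_add]
      by_cases hxb : x = b
      · subst hxb; simp [hq]
      · simp [hxb]
    · rw [if_neg hq]
      refine ⟨fun x => ?_, fun hn => (ih _).2 hn⟩
      rw [(ih _).1 x]
      by_cases hxb : x = b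
      · subst hxb; simp [hq]
      · simp [hxb]

-- ---- A's index loop is scanA ----

lemma chunkStep_eoc (pre suf : List (Int × Bool)) (n : Int) (t : Bool) (a bal : Int) :
    chunkStep (pre ++ (n, t) :: suf) (a, bal) ((pre.length : Int), (n, t)) =
      (if eocB n t suf then ((if (if t then bal + 1 else bal - 1) = -1 then a + 1 else a), 0)
       else (a, (if t then bal + 1 else bal - 1))) := by
  cases suf with
  | nil =>
    have hlt : ¬ ((pre.length : Int) + 1 < PySem.List.len (pre ++ [(n, t)])) := by
      rw [PySem.List.len_eq]; simp only [List.length_append, List.length_cons, List.length_nil]; push_cast; omega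
    simp only [chunkStep, hlt, if_false, eocB, if_true]
  | cons q suf =>
    obtain ⟨m, u⟩ := q
    have hlt : ((pre.length : Int) + 1 < PySem.List.len (pre ++ (n, t) :: (m, u) :: suf)) := by
      rw [PySem.List.len_eq]; simp only [List.length_append, List.length_cons]; push_cast; omega
    have hidx : ((pre.length : Int) + 1) = ((pre.length + 1 : Nat) : Int) := by push_cast; ring
    have hget : PySem.List.pyGetD (pre ++ (n, t) :: (m, u) :: suf) ((pre.length : Int) + 1) ((0 : Int), false) = (m, u) := by
      rw [hidx, PySem.List.pyGetD_natCast, List.getD_eq_getElem?_getD,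
        List.getElem?_append_right (by omega)]
      simp
    simp only [chunkStep, hlt, if_true, hget, eocB]
    rfl

lemma chunkLoop : ∀ (suf pre : List (Int × Bool)) (a bal : Int),
    ((PySem.List.enumerate suf (pre.length : Int)).foldl (chunkStep (pre ++ suf)) (a, bal)).1
      = scanA suf a bal := by
  intro suf
  induction suf with
  | nil => intro pre a bal; simp [PySem.List.enumerate, scanA]
  | cons p suf ih =>
    intro pre a bal
    obtain ⟨n, t⟩ := p
    rw [PySem.List.enumerate_cons]
    simp only [List.foldl_cons]
    rw [chunkStep_eoc]
    have hpp : pre ++ (n, t) :: suf = (pre ++ [(n, t)]) ++ suf := by simp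
    have hlen : ((pre.length : Int) + 1) = (((pre ++ [(n, t)]).length : Nat) : Int) := by
      push_cast [List.length_append]; simp
    by_cases he : eocB n t suf = true
    · rw [if_pos he]
      rw [hpp, hlen, ih (pre ++ [(n, t)])]
      simp only [scanA, he, if_true]
    · have he' : eocB n t suf = false := by simpa using he
      rw [if_neg (by simp [he'])]
      rw [hpp, hlen, ih (pre ++ [(n, t)])]
      simp [scanA, he']

-- ---- scanA facts ----

lemma scanA_acc : ∀ (L : List (Int × Bool)) (acc bal : Int), scanA L acc bal = acc + scanA L 0 bal := by
  intro L
  induction L with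
  | nil => intro acc bal; simp [scanA]
  | cons p rest ih =>
    intro acc bal
    obtain ⟨n, t⟩ := p
    simp only [scanA]
    by_cases he : eocB n t rest = true
    · rw [if_pos he, if_pos he]
      by_cases hb : (if t then bal + 1 else bal - 1) = -1
      · rw [if_pos hb, if_pos hb, ih (acc + 1), ih (0 + 1)]; ring
      · rw [if_neg hb, if_neg hb, ih acc]
    · rw [if_neg he, if_neg he, ih acc]

def runBal (t : Bool) (k : Nat) : Int := if t then ((k % 2 : Nat) : Int) else -((k % 2 : Nat) : Int)

lemma scan_run : ∀ (k : Nat) (n : Int) (t : Bool) (rest : List (Int × Bool)) (acc bal : Int),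
    sep (n + k) (endT t (k + 1)) rest →
    ((t = false ∧ (bal = 0 ∨ bal = 1)) ∨ (t = true ∧ (bal = 0 ∨ bal = -1))) →
    scanA (runP n t (k + 1) ++ rest) acc bal =
      scanA rest (if bal + runBal t (k + 1) = -1 then acc + 1 else acc) 0 := by
  intro k
  induction k with
  | zero =>
    intro n t rest acc bal hsep hbal
    simp only [runP, List.cons_append, List.nil_append]
    have he : eocB n t rest = true := by
      cases rest with
      | nil => rfl
      | cons q rest =>
        obtain ⟨m, u⟩ := q
        have hs : n + 1 < m ∨ u = endT t 1 := by simpa [sep] using hsep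
        have ht1 : endT t 1 = t := by simp [endT, typeAt]
        rw [ht1] at hs
        rcases hs with hs | hs
        · simp [eocB, hs]
        · subst hs; simp [eocB]
    simp only [scanA, he, if_true]
    congr 1
    have : runBal t 1 = if t then 1 else -1 := by cases t <;> simp [runBal]
    rw [this]
    cases t <;> simp
  | succ k ih =>
    intro n t rest acc bal hsep hbal
    have hrw : runP n t (k + 1 + 1) = (n, t) :: runP (n + 1) (!t) (k + 1) := rfl
    rw [hrw]
    have hrw2 : ∃ tl, runP (n + 1) (!t) (k + 1) = (n + 1, !t) :: tl := ⟨runP (n + 1 + 1) (!(!t)) k, rfl⟩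
    obtain ⟨tl, htl⟩ := hrw2
    simp only [List.cons_append, scanA]
    have he : eocB n t (runP (n + 1) (!t) (k + 1) ++ rest) = false := by
      rw [htl]; cases t <;> simp [eocB]
    rw [he, if_neg (by simp)]
    have hsep' : sep ((n + 1) + k) (endT (!t) (k + 1)) rest := by
      have e1 : (n + 1) + (k : Int) = n + ((k : Nat) + 1 : Nat) := by push_cast; ring
      have e2 : endT (!t) (k + 1) = endT t (k + 1 + 1) := by
        simp [endT, typeAt_succ]
      rw [e1, e2]; exact hsep
    have hbal' : ((!t) = false ∧ ((if t then bal + 1 else bal - 1) = 0 ∨ (if t then bal + 1 else bal - 1) = 1)) ∨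
        ((!t) = true ∧ ((if t then bal + 1 else bal - 1) = 0 ∨ (if t then bal + 1 else bal - 1) = -1)) := by
      rcases hbal with ⟨ht, hb⟩ | ⟨ht, hb⟩ <;> subst ht <;> simp <;> omega
    rw [ih (n + 1) (!t) rest acc _ hsep' hbal']
    congr 1
    have harith : (if t then bal + 1 else bal - 1) + runBal (!t) (k + 1) = bal + runBal t (k + 1 + 1) := by
      have h1 : ((k + 1) % 2 : Nat) + ((k + 2) % 2 : Nat) = 1 := by omega
      cases t <;> simp [runBal] <;> omega
    rw [harith]

lemma run_key_lb : ∀ (k : Nat) (n : Int) (t : Bool) (p : Int × Bool), p ∈ runP n t k → n ≤ p.1 := by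
  intro k
  induction k with
  | zero => intro n t p h; simp [runP] at h
  | succ k ih =>
    intro n t p h
    rcases List.mem_cons.mp h with h | h
    · simp [h]
    · have := ih (n + 1) (!t) p h; omega

lemma mem_fKeys (L : List (Int × Bool)) (b : Int) : b ∈ fKeys L ↔ (b, false) ∈ L := by
  constructor
  · intro h
    obtain ⟨p, hp, hpb⟩ := List.mem_map.mp h
    have hp2 := List.mem_filter.mp hp
    have : p = (b, false) := by
      obtain ⟨x, s⟩ := p
      simp at hpb hp2
      exact Prod.ext hpb (by simpa using hp2.2)
    rw [← this]; exact hp2.1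
  · intro h
    exact List.mem_map.mpr ⟨(b, false), List.mem_filter.mpr ⟨h, by simp⟩, rfl⟩

lemma runP_two (n : Int) (t : Bool) (k : Nat) :
    runP n t (k + 2) = (n, t) :: (n + 1, !t) :: runP (n + 2) t k := by
  show (n, t) :: runP (n + 1) (!t) (k + 1) = _
  congr 1
  show (n + 1, !t) :: runP (n + 1 + 1) (!(!t)) k = _
  rw [Bool.not_not]
  have : n + 1 + 1 = n + 2 := by ring
  rw [this]

-- ---- B's greedy loop on one run ----

lemma grun : ∀ (k : Nat) (n : Int) (t : Bool) (R : PySem.Set Int) (c : Int),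
    (∀ x : Int, (x, true) ∈ runP n t k → x ∈ R) →
    (∀ b ∈ fKeys (runP n t k), ∀ x : Int, x = b - 1 ∨ x = b + 1 → (x ∈ R ↔ (x, true) ∈ runP n t k)) →
    ((fKeys (runP n t k)).foldl altStep (R, c)).2 = c + (if t = false ∧ k % 2 = 1 then 1 else 0) ∧
    (∀ x : Int, x ∈ ((fKeys (runP n t k)).foldl altStep (R, c)).1 ↔
      (x ∈ R ∧ ((x, true) ∉ runP n t k ∨ (t = true ∧ k % 2 = 1 ∧ x = n + k - 1)))) := by
  intro k
  induction k using Nat.strong_induction_on with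
  | _ k ih =>
  match k with
  | 0 =>
    intro n t R c _ _
    simp [runP, fKeys]
  | 1 =>
    intro n t R c hIn hq
    cases t with
    | true =>
      have hfk : fKeys (runP n true 1) = [] := by simp [runP, fKeys]
      rw [hfk]
      simp only [List.foldl_nil]
      refine ⟨by simp, fun x => ?_⟩
      simp only [runP]
      constructor
      · intro hx
        refine ⟨hx, ?_⟩
        by_cases hxn : x = n
        · subst hxn; exact Or.inr ⟨by trivial, by norm_num, by push_cast; ring⟩
        · exact Or.inl (by simp [hxn])
      · exact fun hx => hx.1
    | false =>
      have hfk : fKeys (runP n false 1) = [n] := by simp [runP, fKeys]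
      rw [hfk]
      have hm1 : (n - 1) ∉ R := by
        intro hx
        have := (hq n (by rw [hfk]; simp) (n - 1) (Or.inl rfl)).mp hx
        have h2 : n ≤ n - 1 := by simpa using run_key_lb 1 n false _ this
        omega
      have hp1 : (n + 1) ∉ R := by
        intro hx
        have := (hq n (by rw [hfk]; simp) (n + 1) (Or.inr rfl)).mp hx
        simp [runP, Prod.ext_iff] at this
      simp only [List.foldl_cons, List.foldl_nil]
      rw [altStep_eq, if_neg hm1, if_neg hp1]
      refine ⟨by simp, fun x => ?_⟩
      simp [runP, Prod.ext_iff]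
  | (k + 2) =>
    intro n t R c hIn hq
    have hshape := runP_two n t k
    cases t with
    | false =>
      have hfk : fKeys (runP n false (k + 2)) = n :: fKeys (runP (n + 2) false k) := by
        rw [hshape]; simp [fKeys]
      have hnfk : n ∈ fKeys (runP n false (k + 2)) := by rw [hfk]; exact List.mem_cons_self ..
      have hm1 : (n - 1) ∉ R := by
        intro hx
        have := (hq n hnfk (n - 1) (Or.inl rfl)).mp hx
        have h2 : n ≤ n - 1 := by simpa using run_key_lb _ n false _ this
        omega
      have hp1 : (n + 1) ∈ R := hIn (n + 1) (by rw [hshape]; simp)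
      rw [hfk]
      simp only [List.foldl_cons]
      rw [altStep_eq, if_neg hm1, if_pos hp1]
      have hsub : ∀ x : Int, (x, true) ∈ runP (n + 2) false k → n + 2 ≤ x :=
        fun x hx => run_key_lb _ _ _ _ hx
      have hbig : ∀ x : Int, (x, true) ∈ runP n false (k + 2) ↔ (x = n + 1 ∨ (x, true) ∈ runP (n + 2) false k) := by
        intro x; rw [hshape]; simp [Prod.ext_iff]
      have hIn' : ∀ x : Int, (x, true) ∈ runP (n + 2) false k → x ∈ PySem.Set.discard R (n + 1) := by
        intro x hx
        rw [PySem.Set.mem_discard]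
        exact ⟨hIn x ((hbig x).mpr (Or.inr hx)), by have := hsub x hx; omega⟩
      have hq' : ∀ b ∈ fKeys (runP (n + 2) false k), ∀ x : Int, x = b - 1 ∨ x = b + 1 →
          (x ∈ PySem.Set.discard R (n + 1) ↔ (x, true) ∈ runP (n + 2) false k) := by
        intro b hb x hx
        have hbbig : b ∈ fKeys (runP n false (k + 2)) := by rw [hfk]; exact List.mem_cons_of_mem _ hb
        have hblb : n + 2 ≤ b := run_key_lb _ _ _ (b, false) ((mem_fKeys _ _).mp hb)
        rw [PySem.Set.mem_discard, hq b hbbig x hx, hbig x]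
        constructor
        · rintro ⟨hx1 | hx1, hne⟩
          · exact absurd hx1 hne
          · exact hx1
        · intro hx1
          exact ⟨Or.inr hx1, by have := hsub x hx1; omega⟩
      obtain ⟨ihc, ihm⟩ := ih k (by omega) (n + 2) false (PySem.Set.discard R (n + 1)) c hIn' hq'
      refine ⟨?_, fun x => ?_⟩
      · rw [ihc]
        have : (k + 2) % 2 = k % 2 := by omega
        simp [this]
      · rw [ihm x]
        simp only [PySem.Set.mem_discard, hbig x]
        constructor
        · rintro ⟨⟨hxR, hne⟩, hrest | hrest⟩
          · exact ⟨hxR, Or.inl (by simp [hne, hrest])⟩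
          · exact ⟨hxR, Or.inr (by simp at hrest)⟩
        · rintro ⟨hxR, hrest | hrest⟩
          · rw [not_or] at hrest
            exact ⟨⟨hxR, hrest.1⟩, Or.inl hrest.2⟩
          · simp at hrest
      | true =>
      have hfk : fKeys (runP n true (k + 2)) = (n + 1) :: fKeys (runP (n + 2) true k) := by
        rw [hshape]; simp [fKeys]
      have hn : n ∈ R := hIn n (by rw [hshape]; simp)
      rw [hfk]
      simp only [List.foldl_cons]
      rw [altStep_eq]
      have hstep : (n + 1 - 1) = n := by ring
      rw [hstep, if_pos hn]
      have hsub : ∀ x : Int, (x, true) ∈ runP (n + 2) true k → n + 2 ≤ x :=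
        fun x hx => run_key_lb _ _ _ _ hx
      have hbig : ∀ x : Int, (x, true) ∈ runP n true (k + 2) ↔ (x = n ∨ (x, true) ∈ runP (n + 2) true k) := by
        intro x; rw [hshape]; simp [Prod.ext_iff]
      have hIn' : ∀ x : Int, (x, true) ∈ runP (n + 2) true k → x ∈ PySem.Set.discard R n := by
        intro x hx
        rw [PySem.Set.mem_discard]
        exact ⟨hIn x ((hbig x).mpr (Or.inr hx)), by have := hsub x hx; omega⟩
      have hq' : ∀ b ∈ fKeys (runP (n + 2) true k), ∀ x : Int, x = b - 1 ∨ x = b + 1 →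
          (x ∈ PySem.Set.discard R n ↔ (x, true) ∈ runP (n + 2) true k) := by
        intro b hb x hx
        have hbbig : b ∈ fKeys (runP n true (k + 2)) := by rw [hfk]; exact List.mem_cons_of_mem _ hb
        have hblb : n + 2 ≤ b := run_key_lb _ _ _ (b, false) ((mem_fKeys _ _).mp hb)
        rw [PySem.Set.mem_discard, hq b hbbig x hx, hbig x]
        constructor
        · rintro ⟨hx1 | hx1, hne⟩
          · exact absurd hx1 hne
          · exact hx1
        · intro hx1
          exact ⟨Or.inr hx1, by have := hsub x hx1; omega⟩
      obtain ⟨ihc, ihm⟩ := ih k (by omega) (n + 2) true (PySem.Set.discard R n) c hIn' hq'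
      refine ⟨?_, fun x => ?_⟩
      · rw [ihc]; simp
      · rw [ihm x]
        simp only [PySem.Set.mem_discard, hbig x]
        have hpar : (k + 2) % 2 = k % 2 := by omega
        constructor
        · rintro ⟨⟨hxR, hne⟩, hrest | hrest⟩
          · exact ⟨hxR, Or.inl (by simp [hne, hrest])⟩
          · refine ⟨hxR, Or.inr ⟨by trivial, by omega, by push_cast; omega⟩⟩
        · rintro ⟨hxR, hrest | hrest⟩
          · rw [not_or] at hrest
            exact ⟨⟨hxR, hrest.1⟩, Or.inl hrest.2⟩
          · obtain ⟨-, hpk, hxv⟩ := hrest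
            have hne : x ≠ n := by push_cast at hxv; omega
            refine ⟨⟨hxR, hne⟩, Or.inr ⟨by trivial, by omega, by push_cast at hxv ⊢; omega⟩⟩

-- ---- peeling the first maximal alternating run ----

lemma peel : ∀ (L0 : List (Int × Bool)) (n : Int) (t : Bool),
    strictK ((n, t) :: L0) →
    ∃ (k : Nat) (rest : List (Int × Bool)), (n, t) :: L0 = runP n t (k + 1) ++ rest ∧
      sep (n + k) (endT t (k + 1)) rest ∧ strictK rest := by
  intro L0
  induction L0 with
  | nil =>
    intro n t _
    exact ⟨0, [], by simp [runP], by simp [sep], List.Pairwise.nil⟩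
  | cons p L1 ih =>
    intro n t h
    obtain ⟨m, u⟩ := p
    have hp := List.pairwise_cons.mp h
    have hnm : n < m := hp.1 (m, u) (by simp)
    have htail : strictK ((m, u) :: L1) := hp.2
    by_cases hcont : m = n + 1 ∧ u = !t
    · obtain ⟨k', rest, heq, hsep, hrest⟩ := ih m u htail
      refine ⟨k' + 1, rest, ?_, ?_, hrest⟩
      · have : runP n t (k' + 1 + 1) = (n, t) :: runP (n + 1) (!t) (k' + 1) := rfl
        rw [this, List.cons_append, heq, hcont.1, hcont.2]
      · have e1 : n + ((k' + 1 : Nat) : Int) = m + k' := by rw [hcont.1]; push_cast; ring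
        have e2 : endT t (k' + 1 + 1) = endT u (k' + 1) := by
          rw [hcont.2]; simp [endT, typeAt_succ]
        rw [e1, e2]; exact hsep
    · refine ⟨0, (m, u) :: L1, by simp [runP], ?_, htail⟩
      have : n + ((0 : Nat) : Int) = n := by simp
      rw [this]
      show n + 1 < m ∨ u = endT t 1
      have ht1 : endT t 1 = t := by simp [endT, typeAt]
      rw [ht1]
      by_cases hm : m = n + 1
      · right
        subst hm
        rcases Bool.eq_false_or_eq_true u with hu | hu <;> rcases Bool.eq_false_or_eq_true t with ht | ht <;>
          simp_all
      · left; omega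

-- ---- the main run-by-run induction: greedy = scanA ----

lemma gShift : ∀ (bs : List Int) (R : PySem.Set Int) (c : Int),
    bs.foldl altStep (R, c) = ((bs.foldl altStep (R, (0:Int))).1, c + (bs.foldl altStep (R, (0:Int))).2) := by
  intro bs
  induction bs with
  | nil => intro R c; simp
  | cons b bs ih =>
    intro R c
    simp only [List.foldl_cons]
    rw [altStep_eq, altStep_eq]
    split_ifs with h1 h2
    · exact ih _ c
    · exact ih _ c
    · rw [ih _ (c + 1), ih _ (0 + 1)]
      refine Prod.ext rfl ?_
      simp; ring

lemma run_key_ub : ∀ (k : Nat) (n : Int) (t : Bool) (p : Int × Bool), p ∈ runP n t k → p.1 < n + k := by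
  intro k
  induction k with
  | zero => intro n t p h; simp [runP] at h
  | succ k ih =>
    intro n t p h
    rcases List.mem_cons.mp h with h | h
    · have : p.1 = n := by simp [h]
      push_cast; omega
    · have := ih (n + 1) (!t) p h; push_cast at this ⊢; omega

lemma run_length : ∀ (k : Nat) (n : Int) (t : Bool), (runP n t k).length = k := by
  intro k
  induction k with
  | zero => intro n t; simp [runP]
  | succ k ih => intro n t; simp [runP, ih]

lemma fKeys_append (L1 L2 : List (Int × Bool)) : fKeys (L1 ++ L2) = fKeys L1 ++ fKeys L2 := by
  simp [fKeys]

lemma key_unique (L : List (Int × Bool)) (h : strictK L) (x : Int) (s1 s2 : Bool) :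
    (x, s1) ∈ L → (x, s2) ∈ L → s1 = s2 := by
  induction L with
  | nil => intro h1 _; simp at h1
  | cons p L ih =>
    intro h1 h2
    have hp := List.pairwise_cons.mp h
    rcases List.mem_cons.mp h1 with h1 | h1 <;> rcases List.mem_cons.mp h2 with h2 | h2
    · exact congrArg Prod.snd (h1.trans h2.symm)
    · exfalso; have := hp.1 _ h2; rw [← h1] at this; simp at this
    · exfalso; have := hp.1 _ h1; rw [← h2] at this; simp at this
    · exact ih hp.2 h1 h2

lemma run_last_mem (k : Nat) (n : Int) (t : Bool) : (n + k, endT t (k + 1)) ∈ runP n t (k + 1) := by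
  rw [mem_runP]
  exact ⟨k, by omega, rfl, rfl⟩

lemma mainEq : ∀ (N : Nat) (L : List (Int × Bool)) (R : PySem.Set Int),
    L.length ≤ N → strictK L → okR L R →
    ((fKeys L).foldl altStep (R, (0 : Int))).2 = scanA L 0 0 := by
  intro N
  induction N with
  | zero =>
    intro L R hlen _ _
    have : L = [] := List.length_eq_zero_iff.mp (by omega)
    subst this
    simp [fKeys, scanA]
  | succ N ihN =>
    intro L R hlen hstrict hok
    cases L with
    | nil => simp [fKeys, scanA]
    | cons p L0 =>
      obtain ⟨n, t⟩ := p
      obtain ⟨k, rest, heq, hsep, hrest⟩ := peel L0 n t hstrict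
      rw [heq] at hstrict hok hlen ⊢
      have hpa := List.pairwise_append.mp hstrict
      have hF1 : ∀ q ∈ rest, n + k < q.1 := by
        intro q hq
        exact hpa.2.2 _ (run_last_mem k n t) q hq
      have hIn : ∀ x : Int, (x, true) ∈ runP n t (k + 1) → x ∈ R :=
        fun x hx => hok.1 x (List.mem_append_left _ hx)
      have hrun_strict : strictK (runP n t (k + 1)) := hpa.1
      have hq : ∀ b ∈ fKeys (runP n t (k + 1)), ∀ x : Int, x = b - 1 ∨ x = b + 1 →
          (x ∈ R ↔ (x, true) ∈ runP n t (k + 1)) := by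
        intro b hb x hx
        have hbf : (b, false) ∈ runP n t (k + 1) := (mem_fKeys _ _).mp hb
        have hblb : n ≤ b := run_key_lb _ _ _ _ hbf
        have hbub : b < n + (k + 1 : Nat) := run_key_ub _ _ _ _ hbf
        push_cast at hbub
        constructor
        · intro hxR
          rcases hok.2 x hxR with hL | hbel
          · rcases List.mem_append.mp hL with h | h
            · exact h
            · exfalso
              have hxgt := hF1 _ h
              simp at hxgt
              cases rest with
              | nil => simp at h
              | cons q rest' =>
                obtain ⟨m, u⟩ := q
                have hmgt : n + k < m := by simpa using hF1 (m, u) (List.mem_cons_self ..)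
                have hrp := List.pairwise_cons.mp hrest
                have hxm : m ≤ x := by
                  rcases List.mem_cons.mp h with h' | h'
                  · simp [Prod.ext_iff] at h'; omega
                  · have := hrp.1 _ h'; simp at this; omega
                have hxeq : x = n + k + 1 ∧ b = n + k := by omega
                have hmeq : m = n + k + 1 := by omega
                have hu : u = endT t (k + 1) := by
                  rcases hsep with hs | hs
                  · omega
                  · exact hs
                have hendfalse : endT t (k + 1) = false := by
                  have hbend : b = n + (k : Int) := hxeq.2
                  have : (n + (k : Int), endT t (k + 1)) ∈ runP n t (k + 1) := run_last_mem k n t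
                  rw [← hbend] at this
                  exact key_unique _ hrun_strict b _ _ this hbf
                have hxu : (x, true) = (m, u) := by
                  rcases List.mem_cons.mp h with h' | h'
                  · exact h'
                  · exfalso; have := hrp.1 _ h'; simp at this; omega
                rw [hu, hendfalse] at hxu
                simp [Prod.ext_iff] at hxu
          · exfalso
            have hhead : ∃ tl, runP n t (k + 1) ++ rest = (n, t) :: tl := by
              refine ⟨runP (n + 1) (!t) k ++ rest, ?_⟩
              show (runP n t (k + 1)) ++ rest = _
              rfl
            obtain ⟨tl, htl⟩ := hhead
            rw [htl] at hbel
            rcases hbel with hbel | hbel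
            · omega
            · obtain ⟨hxn, ht⟩ := hbel
              have hbn : b = n := by omega
              rw [hbn] at hbf
              have : t = false := by
                have hhm : (n, t) ∈ runP n t (k + 1) ++ rest := by rw [htl]; exact List.mem_cons_self ..
                rcases List.mem_append.mp hhm with hh | hh
                · exact key_unique _ hrun_strict n _ _ hh hbf
                · exfalso; have := hF1 _ hh; simp at this; omega
              rw [ht] at this
              exact Bool.noConfusion this
        · intro hans
          exact hok.1 x (List.mem_append_left _ hans)
      obtain ⟨gc, gm⟩ := grun (k + 1) n t R 0 hIn hq
      rw [fKeys_append, List.foldl_append]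
      have hS1 : (fKeys (runP n t (k + 1))).foldl altStep (R, (0 : Int)) =
          (((fKeys (runP n t (k + 1))).foldl altStep (R, (0 : Int))).1,
           ((fKeys (runP n t (k + 1))).foldl altStep (R, (0 : Int))).2) := rfl
      set R' := ((fKeys (runP n t (k + 1))).foldl altStep (R, (0 : Int))).1 with hR'
      set c1 := ((fKeys (runP n t (k + 1))).foldl altStep (R, (0 : Int))).2 with hc1
      rw [hS1, gShift]
      have hokrest : okR rest R' := by
        constructor
        · intro x hx
          rw [hR', gm]
          refine ⟨hok.1 x (List.mem_append_right _ hx), Or.inl ?_⟩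
          intro hc
          have := run_key_ub _ _ _ _ hc
          have := hF1 _ hx
          simp at this
          push_cast at *
          omega
        · intro x hx
          rw [hR', gm] at hx
          obtain ⟨hxR, hcond⟩ := hx
          rcases hok.2 x hxR with hL | hbel
          · rcases List.mem_append.mp hL with h | h
            · rcases hcond with hc | hc
              · exact absurd h hc
              · obtain ⟨ht, hpar, hxv⟩ := hc
                right
                cases rest with
                | nil => trivial
                | cons q rest' =>
                  obtain ⟨m, u⟩ := q
                  have hmgt : n + k < m := by simpa using hF1 (m, u) (List.mem_cons_self ..)
                  rcases hsep with hs | hs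
                  · left; push_cast at hxv; omega
                  · have hend : endT t (k + 1) = true := by
                      rw [ht]
                      have hk : k % 2 = 0 := by omega
                      simp [endT, typeAt, hk]
                    rw [hend] at hs
                    by_cases hm : m = n + k + 1
                    · right; constructor
                      · push_cast at hxv; omega
                      · exact hs
                    · left; push_cast at hxv; omega
            · left; exact h
          · right
            cases rest with
            | nil => trivial
            | cons q rest' =>
              obtain ⟨m, u⟩ := q
              have hmgt : n + k < m := by simpa using hF1 (m, u) (List.mem_cons_self ..)
              have hhead : ∃ tl, runP n t (k + 1) ++ ((m, u) :: rest') = (n, t) :: tl := by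
                refine ⟨runP (n + 1) (!t) k ++ _, rfl⟩
              obtain ⟨tl, htl⟩ := hhead
              rw [htl] at hbel
              rcases hbel with hbel | hbel
              · left; omega
              · left; omega
      have hrlen : rest.length ≤ N := by
        rw [List.length_append, run_length] at hlen
        omega
      have hIH := ihN rest R' hrlen hrest hokrest
      have hscan : scanA (runP n t (k + 1) ++ rest) 0 0 =
          scanA rest (if (0 : Int) + runBal t (k + 1) = -1 then 0 + 1 else 0) 0 := by
        apply scan_run k n t rest 0 0 hsep
        cases t
        · exact Or.inl ⟨rfl, Or.inl rfl⟩
        · exact Or.inr ⟨rfl, Or.inl rfl⟩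
      rw [hscan, scanA_acc]
      have hdelta : c1 = (if (0 : Int) + runBal t (k + 1) = -1 then 0 + 1 else 0) := by
        rw [gc]
        cases t with
        | false =>
          by_cases hp : (k + 1) % 2 = 1
          · simp [runBal, hp]
          · have : (k + 1) % 2 = 0 := by omega
            simp [runBal, this]
        | true =>
          have : ¬ ((0 : Int) + runBal true (k + 1) = -1) := by
            simp [runBal]
            omega
          rw [if_neg this]
          simp
      rw [hIH]
      omega

-- ---- B-side bridging folds ----

lemma gSkip (Rbig : PySem.Set Int) (pb : Int → Bool)
    (hpb : ∀ x : Int, pb x = true ↔ ((x - 1) ∈ Rbig ∨ (x + 1) ∈ Rbig)) :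
    ∀ (bs : List Int) (R : PySem.Set Int) (c : Int), (∀ x ∈ R, x ∈ Rbig) →
    (bs.foldl altStep (R, c)).2 = ((bs.countP (fun x => !pb x) : Int)) + ((bs.filter pb).foldl altStep (R, c)).2 := by
  intro bs
  induction bs with
  | nil => intro R c _; simp
  | cons b bs ih =>
    intro R c hsub
    simp only [List.foldl_cons, List.filter_cons, List.countP_cons]
    by_cases hq : pb b = true
    · rw [if_pos hq]
      simp only [hq, Bool.not_true, List.foldl_cons]
      have hstep : ∀ S : PySem.Set Int, (∀ x ∈ S, x ∈ Rbig) →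
          (altStep (S, c) b).1.Subset S := by
        intro S _
        rw [altStep_eq]
        split_ifs <;> intro x hx <;> first
          | exact (PySem.Set.mem_discard _ _ _ |>.mp hx).1
          | exact hx
      have hsub' : ∀ x ∈ (altStep (R, c) b).1, x ∈ Rbig := fun x hx => hsub x (hstep R hsub hx)
      have := ih (altStep (R, c) b).1 (altStep (R, c) b).2 hsub'
      simpa using this
    · rw [if_neg hq]
      have hnb : ¬ ((b - 1) ∈ Rbig ∨ (b + 1) ∈ Rbig) := by
        intro hc; exact hq ((hpb b).mpr hc)
      rw [not_or] at hnb
      have hstep : altStep (R, c) b = (R, c + 1) := by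
        rw [altStep_eq, if_neg (fun hx => hnb.1 (hsub _ hx)), if_neg (fun hx => hnb.2 (hsub _ hx))]
      rw [hstep]
      have h1 := ih R (c + 1) hsub
      rw [h1]
      rw [gShift (bs.filter pb) R (c + 1), gShift (bs.filter pb) R c]
      simp only [hq, Bool.not_false]
      push_cast
      ring

lemma gCongrR (U : PySem.Set Int) : ∀ (bs : List Int) (R R' : PySem.Set Int) (c : Int),
    (∀ x : Int, x ∈ R ↔ (x ∈ R' ∨ x ∈ U)) → (∀ x ∈ R', x ∉ U) →
    (∀ b ∈ bs, (b - 1) ∉ U ∧ (b + 1) ∉ U) →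
    (bs.foldl altStep (R, c)).2 = (bs.foldl altStep (R', c)).2 := by
  intro bs
  induction bs with
  | nil => intro R R' c _ _ _; simp
  | cons b bs ih =>
    intro R R' c h hdisj hb
    obtain ⟨hb1, hb2⟩ := hb b (List.mem_cons_self ..)
    have hbtl : ∀ x ∈ bs, (x - 1) ∉ U ∧ (x + 1) ∉ U := fun x hx => hb x (List.mem_cons_of_mem _ hx)
    have hm1 : (b - 1) ∈ R ↔ (b - 1) ∈ R' := by
      rw [h]; exact ⟨fun hc => hc.resolve_right hb1, Or.inl⟩
    have hm2 : (b + 1) ∈ R ↔ (b + 1) ∈ R' := by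
      rw [h]; exact ⟨fun hc => hc.resolve_right hb2, Or.inl⟩
    have hdis : ∀ y : Int, y ∉ U →
        (∀ x : Int, x ∈ PySem.Set.discard R y ↔ (x ∈ PySem.Set.discard R' y ∨ x ∈ U)) := by
      intro y hy x
      rw [PySem.Set.mem_discard, PySem.Set.mem_discard, h]
      constructor
      · rintro ⟨hx | hx, hne⟩
        · exact Or.inl ⟨hx, hne⟩
        · exact Or.inr hx
      · rintro (⟨hx, hne⟩ | hx)
        · exact ⟨Or.inl hx, hne⟩
        · exact ⟨Or.inr hx, fun he => hy (he ▸ hx)⟩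
    have hdisj' : ∀ y : Int, ∀ x ∈ PySem.Set.discard R' y, x ∉ U :=
      fun y x hx => hdisj x (PySem.Set.mem_discard _ _ _ |>.mp hx).1
    simp only [List.foldl_cons]
    rw [altStep_eq, altStep_eq]
    by_cases h1 : (b - 1) ∈ R'
    · rw [if_pos (hm1.mpr h1), if_pos h1]
      exact ih _ _ _ (hdis _ hb1) (hdisj' _) hbtl
    · rw [if_neg (fun hx => h1 (hm1.mp hx)), if_neg h1]
      by_cases h2 : (b + 1) ∈ R'
      · rw [if_pos (hm2.mpr h2), if_pos h2]
        exact ih _ _ _ (hdis _ hb2) (hdisj' _) hbtl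
      · rw [if_neg (fun hx => h2 (hm2.mp hx)), if_neg h2]
        exact ih _ _ _ h hdisj hbtl

-- ---- assembly ----

lemma pairwise_lt_of_le_nodup (l : List Int) (h1 : l.Pairwise (· ≤ ·)) (h2 : l.Nodup) :
    l.Pairwise (· < ·) := by
  have := List.Pairwise.and h1 h2
  exact this.imp fun h => lt_of_le_of_ne h.1 h.2

-- ---- names for the pipeline stages of both ports (proof-side only) ----

def aSt (b r : List Int) : PySem.Set Int × PySem.Set Int :=
  (PySem.Set.ofList b).foldl fixStep (PySem.Set.ofList r, PySem.Set.empty)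
def aR1 (b r : List Int) : PySem.Set Int := (aSt b r).1
def aB1 (b r : List Int) : PySem.Set Int := PySem.Set.diff (PySem.Set.ofList b) (aSt b r).2
def aUnf (b r : List Int) : PySem.Set Int := (aB1 b r).foldl (unfixStep (aR1 b r)) PySem.Set.empty
def aB2 (b r : List Int) : PySem.Set Int := PySem.Set.diff (aB1 b r) (aUnf b r)
def aUl (b r : List Int) : PySem.Set Int := (aR1 b r).foldl (uselessStep (aB2 b r)) PySem.Set.empty
def aR2 (b r : List Int) : PySem.Set Int := PySem.Set.diff (aR1 b r) (aUl b r)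
def aL2 (b r : List Int) : List (Int × Bool) :=
  PySem.List.sorted ((aB2 b r).map (fun t => (t, false)) ++ (aR2 b r).map (fun t => (t, true)))
    (fun x => x.1) false
def bCommon (b r : List Int) : PySem.Set Int :=
  PySem.Set.inter (PySem.Set.ofList b) (PySem.Set.ofList r)
def bB1 (b r : List Int) : PySem.Set Int := PySem.Set.diff (PySem.Set.ofList b) (bCommon b r)
def bR1 (b r : List Int) : PySem.Set Int := PySem.Set.diff (PySem.Set.ofList r) (bCommon b r)
def bSB1 (b r : List Int) : List Int := PySem.List.sorted (bB1 b r) (fun x => x) false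
def pbF (b r : List Int) (x : Int) : Bool := decide ((x - 1) ∈ bR1 b r ∨ (x + 1) ∈ bR1 b r)

lemma hA_unfold (b r : List Int) :
    natjecanje b r = ((PySem.List.enumerate (aL2 b r) 0).foldl (chunkStep (aL2 b r))
      ((0 : Int) + PySem.Set.len (aUnf b r), 0)).1 := by
  rfl

lemma hB_unfold (b r : List Int) :
    natjecanje_alt b r = ((bSB1 b r).foldl altStep (bR1 b r, (0 : Int))).2 := by
  rfl

lemma natjecanje_eq_alt (b r : List Int) : natjecanje b r = natjecanje_alt b r := by
  -- membership characterisations of the pipeline stages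
  have hmR1 : ∀ x : Int, x ∈ aR1 b r ↔ (x ∈ r ∧ x ∉ b) := by
    intro x
    have := (fixLoop (PySem.Set.ofList b) (PySem.Set.ofList r) PySem.Set.empty).1 x
    rw [aR1, aSt, this, PySem.Set.mem_ofList, PySem.Set.mem_ofList]
  have hmB1 : ∀ x : Int, x ∈ aB1 b r ↔ (x ∈ b ∧ x ∉ r) := by
    intro x
    have h2 := (fixLoop (PySem.Set.ofList b) (PySem.Set.ofList r) PySem.Set.empty).2 x
    rw [aB1, PySem.Set.mem_diff, aSt, h2, PySem.Set.mem_ofList, PySem.Set.mem_ofList]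
    simp [PySem.Set.empty]
    tauto
  have hmbB1 : ∀ x : Int, x ∈ bB1 b r ↔ (x ∈ b ∧ x ∉ r) := by
    intro x
    rw [bB1, PySem.Set.mem_diff, bCommon, PySem.Set.mem_inter,
      PySem.Set.mem_ofList, PySem.Set.mem_ofList]
    tauto
  have hmbR1 : ∀ x : Int, x ∈ bR1 b r ↔ (x ∈ r ∧ x ∉ b) := by
    intro x
    rw [bR1, PySem.Set.mem_diff, bCommon, PySem.Set.mem_inter,
      PySem.Set.mem_ofList, PySem.Set.mem_ofList]
    tauto
  have hRR : ∀ x : Int, x ∈ aR1 b r ↔ x ∈ bR1 b r := by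
    intro x; rw [hmR1, hmbR1]
  have hBB : ∀ x : Int, x ∈ aB1 b r ↔ x ∈ bB1 b r := by
    intro x; rw [hmB1, hmbB1]
  -- the unfixable / useless loops are conditional-add loops
  have hstepU : ∀ (acc : PySem.Set Int) (t : Int), unfixStep (aR1 b r) acc t =
      if (decide ((t - 1) ∉ aR1 b r) && decide ((t + 1) ∉ aR1 b r)) then PySem.Set.add acc t else acc := by
    intro acc t
    rw [unfixStep, two_mem_len _ _ _ (by omega)]
  have hUnf := addLoop _ _ hstepU (aB1 b r) PySem.Set.empty
  have hmUnf : ∀ x : Int, x ∈ aUnf b r ↔ (x ∈ aB1 b r ∧ ((x - 1) ∉ aR1 b r ∧ (x + 1) ∉ aR1 b r)) := by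
    intro x
    rw [aUnf, hUnf.1 x]
    simp [PySem.Set.empty]
  have hndUnf : (aUnf b r).Nodup := hUnf.2 (by simp [PySem.Set.empty])
  have hmB2 : ∀ x : Int, x ∈ aB2 b r ↔ (x ∈ aB1 b r ∧ ((x - 1) ∈ aR1 b r ∨ (x + 1) ∈ aR1 b r)) := by
    intro x
    rw [aB2, PySem.Set.mem_diff, hmUnf x]
    tauto
  have hstepL : ∀ (acc : PySem.Set Int) (t : Int), uselessStep (aB2 b r) acc t =
      if (decide ((t - 1) ∉ aB2 b r) && decide ((t + 1) ∉ aB2 b r)) then PySem.Set.add acc t else acc := by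
    intro acc t
    rw [uselessStep, two_mem_len _ _ _ (by omega)]
  have hUl := addLoop _ _ hstepL (aR1 b r) PySem.Set.empty
  have hmUl : ∀ x : Int, x ∈ aUl b r ↔ (x ∈ aR1 b r ∧ ((x - 1) ∉ aB2 b r ∧ (x + 1) ∉ aB2 b r)) := by
    intro x
    rw [aUl, hUl.1 x]
    simp [PySem.Set.empty]
  have hmR2 : ∀ x : Int, x ∈ aR2 b r ↔ (x ∈ aR1 b r ∧ ((x - 1) ∈ aB2 b r ∨ (x + 1) ∈ aB2 b r)) := by
    intro x
    rw [aR2, PySem.Set.mem_diff, hmUl x]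
    tauto
  -- nodup facts
  have hndB0 : (PySem.Set.ofList b).Nodup := PySem.Set.nodup_ofList b
  have hndB1 : (aB1 b r).Nodup := PySem.Set.nodup_diff _ _ hndB0
  have hndbB1 : (bB1 b r).Nodup := PySem.Set.nodup_diff _ _ hndB0
  have hndR1 : (aR1 b r).Nodup := by
    rw [aR1, aSt]
    exact fixLoopNodup _ _ _ (PySem.Set.nodup_ofList r)
  have hndB2 : (aB2 b r).Nodup := PySem.Set.nodup_diff _ _ hndB1
  have hndR2 : (aR2 b r).Nodup := PySem.Set.nodup_diff _ _ hndR1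
  have hndSB1 : (bSB1 b r).Nodup :=
    ((PySem.List.sorted_perm (bB1 b r) (fun x => x) false).nodup_iff).mpr hndbB1
  have hmSB1 : ∀ x : Int, x ∈ bSB1 b r ↔ x ∈ bB1 b r := by
    intro x; exact PySem.List.mem_sorted ..
  -- L2 facts
  have hmL2 : ∀ p : Int × Bool, (p ∈ aL2 b r ↔ p ∈ ((aB2 b r).map (fun t => (t, false)) ++ (aR2 b r).map (fun t => (t, true)))) := by
    intro p; exact PySem.List.mem_sorted ..
  have hmemL2F : ∀ x : Int, ((x, false) ∈ aL2 b r) ↔ x ∈ aB2 b r := by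
    intro x; exact (hmL2 (x, false)).trans (by simp)
  have hmemL2T : ∀ x : Int, ((x, true) ∈ aL2 b r) ↔ x ∈ aR2 b r := by
    intro x; exact (hmL2 (x, true)).trans (by simp)
  have hdisjBR : ∀ x : Int, x ∈ aB2 b r → x ∈ aR2 b r → False := by
    intro x hxB hxR
    have h1 := (hmB1 x).mp ((hmB2 x).mp hxB).1
    have h2 := (hmR1 x).mp ((hmR2 x).mp hxR).1
    exact h2.2 h1.1
  have hndKeys : ((aL2 b r).map Prod.fst).Nodup := by
    have hperm : ((aL2 b r).map Prod.fst).Perm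
        ((((aB2 b r).map (fun t => (t, false)) ++ (aR2 b r).map (fun t => (t, true)))).map Prod.fst) :=
      (PySem.List.sorted_perm _ _ _).map _
    rw [hperm.nodup_iff]
    have : ((((aB2 b r).map (fun t => (t, false)) ++ (aR2 b r).map (fun t => (t, true)))).map Prod.fst)
        = aB2 b r ++ aR2 b r := by simp [Function.comp_def]
    rw [this, List.nodup_append]
    refine ⟨hndB2, hndR2, ?_⟩
    intro x hx y hy hxy
    exact hdisjBR x hx (hxy ▸ hy)
  have hstrictL2 : strictK (aL2 b r) := by
    have hle := PySem.List.sorted_pairwise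
      (((aB2 b r).map (fun t => (t, false)) ++ (aR2 b r).map (fun t => (t, true)))) (fun x => x.1)
    have hne : (aL2 b r).Pairwise (fun p q => p.1 ≠ q.1) := by
      rw [← List.pairwise_map]
      exact hndKeys
    exact (hle.and hne).imp fun h => lt_of_le_of_ne h.1 h.2
  -- SB1 strictly increasing
  have hstrictSB1 : (bSB1 b r).Pairwise (· < ·) :=
    pairwise_lt_of_le_nodup _ (PySem.List.sorted_pairwise (bB1 b r) (fun x => x)) hndSB1
  -- fKeys of L2 is the filtered sorted broken list
  have hpbmem : ∀ x : Int, pbF b r x = true ↔ ((x - 1) ∈ bR1 b r ∨ (x + 1) ∈ bR1 b r) := by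
    intro x; simp [pbF]
  have hmFilter : ∀ x : Int, x ∈ (bSB1 b r).filter (pbF b r) ↔ x ∈ aB2 b r := by
    intro x
    rw [List.mem_filter, hmSB1, hpbmem, hmB2, ← hBB]
    rw [← hRR, ← hRR]
  have hfKeysL2 : fKeys (aL2 b r) = (bSB1 b r).filter (pbF b r) := by
    have hpw1 : (fKeys (aL2 b r)).Pairwise (· < ·) := by
      rw [fKeys, List.pairwise_map]
      exact List.Pairwise.sublist List.filter_sublist hstrictL2
    have hpw2 : ((bSB1 b r).filter (pbF b r)).Pairwise (· < ·) :=
      List.Pairwise.sublist List.filter_sublist hstrictSB1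
    have hnd1 : (fKeys (aL2 b r)).Nodup := hpw1.imp ne_of_lt
    have hnd2 : ((bSB1 b r).filter (pbF b r)).Nodup := hpw2.imp ne_of_lt
    have hperm : (fKeys (aL2 b r)).Perm ((bSB1 b r).filter (pbF b r)) := by
      rw [List.perm_ext_iff_of_nodup hnd1 hnd2]
      intro x
      rw [mem_fKeys, hmemL2F, hmFilter]
    exact PySem.List.eq_of_perm_of_pairwise_le_of_injective (fun x : Int => x)
      (fun _ _ h => h) hperm (hpw1.imp le_of_lt) (hpw2.imp le_of_lt)
  -- A's value
  have hA : natjecanje b r = ((aUnf b r).length : Int) + scanA (aL2 b r) 0 0 := by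
    rw [hA_unfold]
    have hc := chunkLoop (aL2 b r) [] ((0 : Int) + PySem.Set.len (aUnf b r)) 0
    simp only [List.length_nil, Nat.cast_zero, List.nil_append] at hc
    rw [hc, scanA_acc]
    rw [PySem.Set.len]
    ring
  -- B's value, step by step
  have hskip := gSkip (bR1 b r) (pbF b r) hpbmem (bSB1 b r) (bR1 b r) 0 (fun x hx => hx)
  -- the skipped count is |unfixable|
  have hcount : ((bSB1 b r).countP (fun x => !pbF b r x)) = (aUnf b r).length := by
    rw [List.countP_eq_length_filter]
    apply List.Perm.length_eq
    rw [List.perm_ext_iff_of_nodup (List.Nodup.filter _ hndSB1) hndUnf]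
    intro x
    rw [List.mem_filter, hmSB1, hmUnf]
    simp only [Bool.not_eq_eq_eq_not, Bool.not_true, ← Bool.not_eq_true, hpbmem]
    rw [← hBB, ← hRR, ← hRR]
    tauto
  -- useless reserves are never touched
  have hcongr := gCongrR (aUl b r) ((bSB1 b r).filter (pbF b r)) (bR1 b r) (aR2 b r) 0
    (by
      intro x
      rw [← hRR, hmR2, hmUl]
      tauto)
    (by
      intro x hx
      rw [hmR2] at hx
      rw [hmUl]
      rintro ⟨-, h1, h2⟩
      rcases hx.2 with h | h
      · exact h1 h
      · exact h2 h)
    (by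
      intro v hv
      have hvB2 : v ∈ aB2 b r := (hmFilter v).mp hv
      constructor
      · rw [hmUl]; rintro ⟨-, -, h2⟩; exact h2 (by simpa using hvB2)
      · rw [hmUl]; rintro ⟨-, h1, -⟩; exact h1 (by simpa using hvB2))
  -- the greedy loop on the cleaned data is A's scan
  have hok : okR (aL2 b r) (aR2 b r) :=
    ⟨fun x hx => (hmemL2T x).mp hx, fun x hx => Or.inl ((hmemL2T x).mpr hx)⟩
  have hmain := mainEq (aL2 b r).length (aL2 b r) (aR2 b r) le_rfl hstrictL2 hok
  rw [hfKeysL2] at hmain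
  -- chain everything
  rw [hB_unfold, hskip, hcongr, hmain, hA, hcount]
theorem natjecanje_spec : Claim_equal_natjecanje := by
  intro b r _
  unfold Spec_natjecanje
  exact natjecanje_eq_alt b r
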